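-- pv_equiv track=rewrite | github.com/mikydna/parlay | src/prop_ev/brief_builder.py | strip_empty_go_placeholder_rows
-- ===== SOURCE A (Python) =====
-- from typing import Any
--
-- def _to_str(value: Any) -> str:
--     if value is None:
--         return ""
--     return str(value)
--
-- def _split_markdown_row(line: str) -> list[str] | None:
--     stripped = line.strip()
--     if not (stripped.startswith("|") and stripped.endswith("|")):
--         return None
--     placeholder = "__PIPE_PLACEHOLDER__"
--     normalized = stripped.replace("\\|", placeholder)
--     cells = [cell.strip().replace(placeholder, "|") for cell in normalized[1:-1].split("|")]
--     if not cells: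
--         return None
--     return cells
--
-- def strip_empty_go_placeholder_rows(markdown: str) -> str:
--     """Remove synthetic GO placeholder rows from Action Plan tables."""
--     lines = markdown.splitlines()
--     action_heading = "## Action Plan (GO / LEAN / NO-GO)"
--     start_idx: int | None = None
--     for idx, line in enumerate(lines):
--         if line.strip() == action_heading:
--             start_idx = idx
--             break
--     if start_idx is None:
--         return markdown.rstrip() + "\n"
--
--     end_idx = len(lines)
--     for idx in range(start_idx + 1, len(lines)):
--         if lines[idx].strip().startswith("## "):
--             end_idx = idx
--             break
--
--     section = lines[start_idx + 1 : end_idx]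
--     filtered: list[str] = []
--     changed = False
--     for line in section:
--         stripped = line.strip()
--         cells = _split_markdown_row(stripped)
--         if cells is not None:
--             action = _to_str(cells[0]).strip().upper()
--             joined = " ".join(cells).lower()
--             if action == "GO":
--                 dash_like = {"", "-", "--", "—"}
--                 middle = [_to_str(cell).strip() for cell in cells[1:-1]]
--                 why = _to_str(cells[-1]).strip().lower() if len(cells) > 1 else ""
--                 placeholder = (
--                     all(cell in dash_like for cell in middle)
--                     and ("no plays" in why)
--                     and ("go" in why)
--                 )
--                 legacy_placeholder = "no plays meet a clean go threshold" in joined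
--                 if placeholder or legacy_placeholder:
--                     changed = True
--                     continue
--         if stripped.startswith("(") and (
--             "no go entries available from the input" in stripped.lower()
--         ):
--             changed = True
--             continue
--         if (
--             stripped.lower().startswith("note:")
--             and "go" in stripped.lower()
--             and "none" in stripped.lower()
--         ):
--             changed = True
--             continue
--         filtered.append(line)
--
--     if not changed:
--         return markdown.rstrip() + "\n"
--
--     normalized: list[str] = []
--     for line in filtered:
--         if not line.strip() and normalized and not normalized[-1].strip():
--             continue
--         normalized.append(line)
--
--     merged = lines[: start_idx + 1] + normalized + lines[end_idx:]
--     return "\n".join(merged).rstrip() + "\n"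
-- ===== SOURCE B (Python) =====
-- # Single forward pass with a 3-state machine (before / inside / after the Action
-- # Plan section) instead of index-search + slice + two section passes; same drop
-- # predicate, identical return values.
--
-- _HEADING = "## Action Plan (GO / LEAN / NO-GO)"
--
--
-- def _split_markdown_row(line):
--     stripped = line.strip()
--     if not (stripped.startswith("|") and stripped.endswith("|")):
--         return None
--     placeholder = "__PIPE_PLACEHOLDER__"
--     normalized = stripped.replace("\\|", placeholder)
--     cells = [cell.strip().replace(placeholder, "|") for cell in normalized[1:-1].split("|")]
--     if not cells:
--         return None
--     return cells
--
--
-- def _should_drop(stripped):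
--     cells = _split_markdown_row(stripped)
--     if cells is not None:
--         if cells[0].strip().upper() == "GO":
--             dash_like = {"", "-", "--", "\u2014"}
--             middle = [cell.strip() for cell in cells[1:-1]]
--             why = cells[-1].strip().lower() if len(cells) > 1 else ""
--             placeholder = (
--                 all(cell in dash_like for cell in middle)
--                 and ("no plays" in why)
--                 and ("go" in why)
--             )
--             if placeholder or "no plays meet a clean go threshold" in " ".join(cells).lower():
--                 return True
--     if stripped.startswith("(") and "no go entries available from the input" in stripped.lower():
--         return True
--     if stripped.lower().startswith("note:") and "go" in stripped.lower() and "none" in stripped.lower():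
--         return True
--     return False
--
--
-- def strip_empty_go_placeholder_rows(markdown):
--     """Remove synthetic GO placeholder rows from Action Plan tables."""
--     out = []
--     state = 0  # 0 = before heading, 1 = inside section, 2 = after section
--     changed = False
--     for line in markdown.splitlines():
--         stripped = line.strip()
--         if state == 0:
--             out.append(line)
--             if stripped == _HEADING:
--                 state = 1
--         elif state == 2:
--             out.append(line)
--         elif stripped.startswith("## "):
--             out.append(line)
--             state = 2
--         elif _should_drop(stripped):
--             changed = True
--         elif not stripped and out and not out[-1].strip():
--             continue
--         else:
--             out.append(line)
--     if not changed:
--         return markdown.rstrip() + "\n"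
--     return "\n".join(out).rstrip() + "\n"
-- ===== Notes on version B (the rewrite author's own statement) =====
-- stated objective: simpler
-- what changed: Replaces A's heading index-search, end-index scan, list slicing and two separate section passes (filter, then blank-collapse) plus re-merge by one forward pass over all lines with a 3-state machine (before/inside/after the section) that drops rows and collapses consecutive blanks inline against the last emitted line; the row/paren/note drop predicate itself is unchanged.
import Mathlib
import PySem

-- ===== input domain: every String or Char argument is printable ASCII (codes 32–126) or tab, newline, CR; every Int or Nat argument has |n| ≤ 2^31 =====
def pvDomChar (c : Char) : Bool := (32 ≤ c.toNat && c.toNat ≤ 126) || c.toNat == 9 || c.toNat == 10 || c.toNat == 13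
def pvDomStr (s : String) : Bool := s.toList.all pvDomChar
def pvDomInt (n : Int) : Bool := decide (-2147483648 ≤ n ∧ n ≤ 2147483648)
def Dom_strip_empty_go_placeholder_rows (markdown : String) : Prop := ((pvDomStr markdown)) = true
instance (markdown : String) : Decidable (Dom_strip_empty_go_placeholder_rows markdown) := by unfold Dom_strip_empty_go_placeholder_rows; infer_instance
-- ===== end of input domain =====

-- B replaces A's index-search + slicing + two separate section passes by one forward
-- pass with a 3-state machine (objective: simpler decomposition, same cost).

-- ===== PORT A =====

def pvHeading : String := "## Action Plan (GO / LEAN / NO-GO)"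

-- _split_markdown_row; Python's `cells[0]` later is safe because the `if not cells` guard
-- makes a returned list nonempty; `split("|")` is split? with the nonempty literal "|",
-- hence always `some` (the `.getD []` default is never taken).
def pvSplitRow (line : String) : Option (List String) :=
  let stripped := PySem.Str.strip line
  if !(PySem.Str.startswith stripped "|" && PySem.Str.endswith stripped "|") then none
  else
    let normalized := PySem.Str.replace stripped "\\|" "__PIPE_PLACEHOLDER__"
    let cells := ((PySem.Str.split? (PySem.Str.slice normalized (some 1) (some (-1))) "|").getD []).map
      (fun c => PySem.Str.replace (PySem.Str.strip c) "__PIPE_PLACEHOLDER__" "|")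
    if cells.isEmpty then none else some cells

-- the `if cells is not None: … if placeholder or legacy_placeholder: … continue` decision of
-- A's loop body (hoisted as a definition; `_to_str` on a str is the identity and is dropped;
-- `cells[0]`/`cells[-1]` on the guaranteed-nonempty cells are pyGetD with a never-used default)
def pvRowDrop (stripped : String) : Bool :=
  match pvSplitRow stripped with
  | none => false
  | some cells =>
    let action := PySem.Str.upper (PySem.Str.strip (PySem.List.pyGetD cells 0 ""))
    let joined := PySem.Str.lower (PySem.Str.join " " cells)
    if action == "GO" then
      let middle := (PySem.List.slice cells (some 1) (some (-1))).map (fun c => PySem.Str.strip c)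
      let why := if cells.length > 1 then PySem.Str.lower (PySem.Str.strip (PySem.List.pyGetD cells (-1) "")) else ""
      let placeholder := middle.all (fun c => ["", "-", "--", "—"].contains c)
        && PySem.Str.isIn "no plays" why && PySem.Str.isIn "go" why
      let legacy := PySem.Str.isIn "no plays meet a clean go threshold" joined
      placeholder || legacy
    else false

-- `stripped.startswith("(") and "no go entries available from the input" in stripped.lower()`
def pvParenDrop (stripped : String) : Bool :=
  PySem.Str.startswith stripped "(" &&
    PySem.Str.isIn "no go entries available from the input" (PySem.Str.lower stripped)

-- `stripped.lower().startswith("note:") and "go" in … and "none" in …`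
def pvNoteDrop (stripped : String) : Bool :=
  PySem.Str.startswith (PySem.Str.lower stripped) "note:" &&
    PySem.Str.isIn "go" (PySem.Str.lower stripped) &&
    PySem.Str.isIn "none" (PySem.Str.lower stripped)

-- `normalized and not normalized[-1].strip()` / `out and not out[-1].strip()`:
-- the Python truthiness guard plus last element, i.e. getLast?
def pvLastBlank (acc : List String) : Bool :=
  match acc.getLast? with | some t => PySem.Str.strip t == "" | none => false

-- `for idx, line in enumerate(lines): if line.strip() == action_heading: start_idx = idx; break`
def aFindStart : List String → Nat → Option Nat
  | [], _ => none
  | l :: ls, i => if PySem.Str.strip l == pvHeading then some i else aFindStart ls (i + 1)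

-- `for idx in range(start_idx + 1, len(lines)): if lines[idx].strip().startswith("## "): end_idx = idx; break`
-- (traverses lines[start_idx+1:], carrying the running index; default end_idx = len(lines))
def aFindEnd : List String → Nat → Nat
  | [], i => i
  | l :: ls, i => if PySem.Str.startswith (PySem.Str.strip l) "## " then i else aFindEnd ls (i + 1)

-- the `for line in section` filter loop; the three `continue` branches in A's order
def aFilterLoop : List String → List String → Bool → (List String × Bool)
  | [], acc, changed => (acc, changed)
  | line :: rest, acc, changed =>
    let stripped := PySem.Str.strip line
    if pvRowDrop stripped then aFilterLoop rest acc true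
    else if pvParenDrop stripped then aFilterLoop rest acc true
    else if pvNoteDrop stripped then aFilterLoop rest acc true
    else aFilterLoop rest (acc ++ [line]) changed

-- the `for line in filtered` blank-collapsing loop
def aNormLoop : List String → List String → List String
  | [], acc => acc
  | line :: rest, acc =>
    if PySem.Str.strip line == "" && pvLastBlank acc then aNormLoop rest acc
    else aNormLoop rest (acc ++ [line])

def strip_empty_go_placeholder_rows (markdown : String) : String :=
  let lines := PySem.Str.splitlines markdown
  match aFindStart lines 0 with
  | none => String.ofList (PySem.Chars.rstrip markdown.toList ++ ['\n'])
  | some startIdx =>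
    let endIdx := aFindEnd (PySem.List.slice lines (some ((startIdx : Int) + 1)) none) (startIdx + 1)
    let sect := PySem.List.slice lines (some ((startIdx : Int) + 1)) (some (endIdx : Int))
    let fc := aFilterLoop sect [] false
    if fc.2 = false then String.ofList (PySem.Chars.rstrip markdown.toList ++ ['\n'])
    else
      let normalized := aNormLoop fc.1 []
      let merged := PySem.List.slice lines none (some ((startIdx : Int) + 1)) ++ normalized
        ++ PySem.List.slice lines (some (endIdx : Int)) none
      String.ofList (PySem.Chars.rstrip (PySem.Str.join "\n" merged).toList ++ ['\n'])

-- ===== PORT B =====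

-- _should_drop of Source B: the same three tests as early returns (Source B's _split_markdown_row
-- and the row/paren/note tests are byte-identical to A's, so those helpers are shared)
def pvShouldDrop (stripped : String) : Bool :=
  if pvRowDrop stripped then true
  else if pvParenDrop stripped then true
  else if pvNoteDrop stripped then true
  else false

-- the single `for line in markdown.splitlines()` pass: state 0 = before the heading,
-- 1 = inside the section, 2 = after it
def bLoop : List String → List String → Nat → Bool → (List String × Bool)
  | [], out, _, changed => (out, changed)
  | line :: rest, out, state, changed =>
    let stripped := PySem.Str.strip line
    if state == 0 then
      bLoop rest (out ++ [line]) (if stripped == pvHeading then 1 else 0) changed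
    else if state == 2 then
      bLoop rest (out ++ [line]) 2 changed
    else if PySem.Str.startswith stripped "## " then
      bLoop rest (out ++ [line]) 2 changed
    else if pvShouldDrop stripped then
      bLoop rest out 1 true
    else if stripped == "" && pvLastBlank out then
      bLoop rest out 1 changed
    else bLoop rest (out ++ [line]) 1 changed

def strip_empty_go_placeholder_rows_alt (markdown : String) : String :=
  let r := bLoop (PySem.Str.splitlines markdown) [] 0 false
  if r.2 = false then String.ofList (PySem.Chars.rstrip markdown.toList ++ ['\n'])
  else String.ofList (PySem.Chars.rstrip (PySem.Str.join "\n" r.1).toList ++ ['\n'])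

-- ===== PRECONDITION & SPEC =====
def Spec_strip_empty_go_placeholder_rows (markdown : String) (out : String) : Prop := out = strip_empty_go_placeholder_rows_alt markdown
instance (markdown : String) (out : String) : Decidable (Spec_strip_empty_go_placeholder_rows markdown out) := by unfold Spec_strip_empty_go_placeholder_rows; infer_instance

-- ===== CLAIM (what is proved, stated in full; the proofs are below) =====
def Claim_equal_strip_empty_go_placeholder_rows : Prop := ∀ (markdown : String), Dom_strip_empty_go_placeholder_rows markdown → Spec_strip_empty_go_placeholder_rows markdown (strip_empty_go_placeholder_rows markdown)

-- ===== LEMMAS AND PROOFS =====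

-- proof-side vocabulary: what A's passes compute over the section
def pvFilt (ls : List String) : List String := ls.filter (fun l => !pvShouldDrop (PySem.Str.strip l))
def pvChg (ls : List String) : Bool := ls.any (fun l => pvShouldDrop (PySem.Str.strip l))

def pvNorm : Bool → List String → List String
  | _, [] => []
  | p, l :: ls =>
    if (PySem.Str.strip l == "") && p then pvNorm p ls
    else l :: pvNorm (PySem.Str.strip l == "") ls

def pvSharp (ls : List String) : Nat :=
  match ls with
  | [] => 0
  | l :: ls => if PySem.Str.startswith (PySem.Str.strip l) "## " then 0 else pvSharp ls + 1

lemma aFilterLoop_eq (ls : List String) : ∀ acc c,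
    aFilterLoop ls acc c = (acc ++ pvFilt ls, c || pvChg ls) := by
  induction ls with
  | nil =>
    intro acc c
    rw [aFilterLoop, pvFilt, pvChg, List.filter_nil, List.any_nil, List.append_nil, Bool.or_false]
  | cons line rest ih =>
    intro acc c
    have hfc : pvFilt (line :: rest)
        = if pvShouldDrop (PySem.Str.strip line) then pvFilt rest else line :: pvFilt rest := by
      rw [pvFilt, List.filter_cons]
      by_cases hd : pvShouldDrop (PySem.Str.strip line) = true
      · rw [if_neg (by simp [hd]), if_pos hd, pvFilt]
      · simp only [Bool.not_eq_true] at hd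
        rw [if_pos (by simp [hd]), if_neg (by simp [hd]), pvFilt]
    have hcc : pvChg (line :: rest) = (pvShouldDrop (PySem.Str.strip line) || pvChg rest) := by
      rw [pvChg, List.any_cons, pvChg]
    have hsd : pvShouldDrop (PySem.Str.strip line)
        = (pvRowDrop (PySem.Str.strip line) || pvParenDrop (PySem.Str.strip line)
            || pvNoteDrop (PySem.Str.strip line)) := by
      rw [pvShouldDrop]
      by_cases h1 : pvRowDrop (PySem.Str.strip line) = true
      · rw [if_pos h1, h1]; simp
      · rw [if_neg h1]
        by_cases h2 : pvParenDrop (PySem.Str.strip line) = true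
        · rw [if_pos h2, h2]; simp [h1]
        · rw [if_neg h2]
          by_cases h3 : pvNoteDrop (PySem.Str.strip line) = true
          · rw [if_pos h3, h3]; simp
          · rw [if_neg h3]
            simp only [Bool.not_eq_true] at h1 h2 h3
            rw [h1, h2, h3]; simp
    rw [aFilterLoop, hfc, hcc, hsd]
    by_cases h1 : pvRowDrop (PySem.Str.strip line) = true
    · rw [if_pos h1, if_pos (by simp [h1]), ih]
      simp [h1]
    · rw [if_neg h1]
      by_cases h2 : pvParenDrop (PySem.Str.strip line) = true
      · rw [if_pos h2, if_pos (by simp [h2]), ih]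
        simp [h2]
      · rw [if_neg h2]
        by_cases h3 : pvNoteDrop (PySem.Str.strip line) = true
        · rw [if_pos h3, if_pos (by simp [h3]), ih]
          simp [h3]
        · simp only [Bool.not_eq_true] at h1 h2 h3
          rw [if_neg (by simp [h3]), if_neg (by simp [h1, h2, h3]), ih]
          simp [h1, h2, h3]

lemma aNormLoop_eq (ls : List String) : ∀ acc,
    aNormLoop ls acc = acc ++ pvNorm (pvLastBlank acc) ls := by
  induction ls with
  | nil => intro acc; rw [aNormLoop, pvNorm, List.append_nil]
  | cons line rest ih =>
    intro acc
    rw [aNormLoop, pvNorm]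
    by_cases hc : (PySem.Str.strip line == "" && pvLastBlank acc) = true
    · rw [if_pos hc, if_pos hc, ih]
    · rw [if_neg hc, if_neg hc, ih]
      have hlast : pvLastBlank (acc ++ [line]) = (PySem.Str.strip line == "") := by
        simp only [pvLastBlank, List.getLast?_concat]
      rw [hlast]
      simp

lemma aFindStart_none (ls : List String) : ∀ i, aFindStart ls i = none →
    ∀ l ∈ ls, (PySem.Str.strip l == pvHeading) = false := by
  induction ls with
  | nil => simp
  | cons a tl ih =>
    intro i h l hl
    rw [aFindStart] at h
    by_cases hc : (PySem.Str.strip a == pvHeading) = true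
    · simp [hc] at h
    · simp only [Bool.not_eq_true] at hc
      simp [hc] at h
      rcases List.mem_cons.mp hl with rfl | hl'
      · exact hc
      · exact ih _ h l hl'

lemma aFindStart_some (ls : List String) : ∀ i k, aFindStart ls i = some k →
    ∃ pre hl tl, ls = pre ++ hl :: tl ∧ k = i + pre.length ∧
      (∀ l ∈ pre, (PySem.Str.strip l == pvHeading) = false) ∧
      (PySem.Str.strip hl == pvHeading) = true := by
  induction ls with
  | nil => simp [aFindStart]
  | cons a tl ih =>
    intro i k h
    rw [aFindStart] at h
    by_cases hc : (PySem.Str.strip a == pvHeading) = true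
    · simp [hc] at h
      exact ⟨[], a, tl, by simp, by simp; omega, by simp, hc⟩
    · simp only [Bool.not_eq_true] at hc
      simp [hc] at h
      obtain ⟨pre, hl, tl', heq, hk, hpre, hhl⟩ := ih _ _ h
      exact ⟨a :: pre, hl, tl', by simp [heq], by simp [hk]; omega, by
        intro l hm; rcases List.mem_cons.mp hm with rfl | hm'; exact hc; exact hpre l hm', hhl⟩

lemma aFindEnd_eq (ls : List String) : ∀ i, aFindEnd ls i = i + pvSharp ls := by
  induction ls with
  | nil => simp [aFindEnd, pvSharp]
  | cons a tl ih =>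
    intro i
    rw [aFindEnd, pvSharp]
    split_ifs with hc
    · simp
    · rw [ih]; omega

lemma pvSharp_take (ls : List String) :
    ∀ l ∈ ls.take (pvSharp ls), PySem.Str.startswith (PySem.Str.strip l) "## " = false := by
  induction ls with
  | nil => simp
  | cons a tl ih =>
    rw [pvSharp]
    split_ifs with hc
    · simp
    · intro l hm
      simp only [List.take_succ_cons, List.mem_cons] at hm
      rcases hm with rfl | hm
      · simpa using hc
      · exact ih l hm

lemma pvSharp_drop (ls : List String) :
    ls.drop (pvSharp ls) = [] ∨
      ∃ r rest, ls.drop (pvSharp ls) = r :: rest ∧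
        PySem.Str.startswith (PySem.Str.strip r) "## " = true := by
  induction ls with
  | nil => left; simp
  | cons a tl ih =>
    rw [pvSharp]
    split_ifs with hc
    · right; exact ⟨a, tl, by simp, hc⟩
    · simpa using ih

lemma bLoop_state0 (ls : List String) : ∀ out c,
    (∀ l ∈ ls, (PySem.Str.strip l == pvHeading) = false) →
    bLoop ls out 0 c = (out ++ ls, c) := by
  induction ls with
  | nil => intro out c _; rw [bLoop, List.append_nil]
  | cons line rest ih =>
    intro out c h
    rw [bLoop]
    rw [if_pos (by decide : ((0:Nat) == 0) = true), h line (by simp)]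
    rw [if_neg (by decide : ¬ (false = true))]
    rw [ih _ _ (fun l hl => h l (List.mem_cons_of_mem _ hl))]
    simp

lemma bLoop_state2 (ls : List String) : ∀ out c,
    bLoop ls out 2 c = (out ++ ls, c) := by
  induction ls with
  | nil => intro out c; rw [bLoop, List.append_nil]
  | cons line rest ih =>
    intro out c
    rw [bLoop]
    rw [if_neg (by decide : ¬ ((2:Nat) == 0) = true), if_pos (by decide : ((2:Nat) == 2) = true), ih]
    simp

lemma bLoop_enter (pre : List String) : ∀ hl tl out c,
    (∀ l ∈ pre, (PySem.Str.strip l == pvHeading) = false) →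
    (PySem.Str.strip hl == pvHeading) = true →
    bLoop (pre ++ hl :: tl) out 0 c = bLoop tl (out ++ pre ++ [hl]) 1 c := by
  induction pre with
  | nil =>
    intro hl tl out c _ hh
    rw [List.nil_append, bLoop, if_pos (by decide : ((0:Nat) == 0) = true), hh,
      if_pos (by decide : (true = true))]
    simp
  | cons a pre ih =>
    intro hl tl out c hp hh
    rw [List.cons_append, bLoop, if_pos (by decide : ((0:Nat) == 0) = true), hp a (by simp),
      if_neg (by decide : ¬ (false = true))]
    rw [ih _ _ _ _ (fun l hl' => hp l (List.mem_cons_of_mem _ hl')) hh]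
    simp

lemma bLoop_section (sec : List String) : ∀ rest out c,
    (∀ l ∈ sec, PySem.Str.startswith (PySem.Str.strip l) "## " = false) →
    bLoop (sec ++ rest) out 1 c
      = bLoop rest (out ++ pvNorm (pvLastBlank out) (pvFilt sec)) 1 (c || pvChg sec) := by
  induction sec with
  | nil =>
    intro rest out c _
    rw [List.nil_append, pvFilt, List.filter_nil, pvNorm, List.append_nil, pvChg, List.any_nil,
      Bool.or_false]
  | cons line sec ih =>
    intro rest out c h
    have htl := fun l hl' => h l (List.mem_cons_of_mem _ hl')
    rw [List.cons_append, bLoop,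
      if_neg (by decide : ¬ ((1:Nat) == 0) = true), if_neg (by decide : ¬ ((1:Nat) == 2) = true),
      if_neg (by rw [h line (by simp)]; simp)]
    by_cases hd : pvShouldDrop (PySem.Str.strip line) = true
    · have hfc : pvFilt (line :: sec) = pvFilt sec := by
        rw [pvFilt, List.filter_cons, if_neg (by simp [hd]), pvFilt]
      have hcc : pvChg (line :: sec) = true := by
        rw [pvChg, List.any_cons, hd, Bool.true_or]
      rw [if_pos hd, ih _ _ _ htl, hfc, hcc]
      simp
    · simp only [Bool.not_eq_true] at hd
      have hfc : pvFilt (line :: sec) = line :: pvFilt sec := by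
        rw [pvFilt, List.filter_cons, if_pos (by simp [hd]), pvFilt]
      have hcc : pvChg (line :: sec) = pvChg sec := by
        rw [pvChg, List.any_cons, hd, Bool.false_or, pvChg]
      rw [if_neg (by simp [hd]), hfc, hcc, pvNorm]
      by_cases hb : (PySem.Str.strip line == "" && pvLastBlank out) = true
      · rw [if_pos hb, if_pos hb, ih _ _ _ htl]
      · rw [if_neg hb, if_neg hb, ih _ _ _ htl]
        have hlast : pvLastBlank (out ++ [line]) = (PySem.Str.strip line == "") := by
          simp only [pvLastBlank, List.getLast?_concat]
        rw [hlast]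
        simp


lemma bLoop_tail (restl : List String) (out : List String) (c : Bool)
    (h : restl = [] ∨ ∃ r rest, restl = r :: rest ∧
      PySem.Str.startswith (PySem.Str.strip r) "## " = true) :
    bLoop restl out 1 c = (out ++ restl, c) := by
  rcases h with rfl | ⟨r, rest, rfl, hr⟩
  · rw [bLoop, List.append_nil]
  · rw [bLoop, if_neg (by decide : ¬ ((1:Nat) == 0) = true),
      if_neg (by decide : ¬ ((1:Nat) == 2) = true), if_pos hr, bLoop_state2]
    simp

-- ===== VERDICT (by name: the statement is the Claim_ definition above) =====
theorem strip_empty_go_placeholder_rows_spec : Claim_equal_strip_empty_go_placeholder_rows := by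
  intro markdown _
  unfold Spec_strip_empty_go_placeholder_rows
  unfold strip_empty_go_placeholder_rows strip_empty_go_placeholder_rows_alt
  cases hfs : aFindStart (PySem.Str.splitlines markdown) 0 with
  | none =>
    have hb := bLoop_state0 (PySem.Str.splitlines markdown) [] false
      (aFindStart_none _ _ hfs)
    simp only [hfs, hb, if_true]
  | some k =>
    obtain ⟨pre, hl, tl, heq, hk, hpre, hhl⟩ := aFindStart_some _ _ _ hfs
    have hk' : k = pre.length := by omega
    have hstrip : PySem.Str.strip hl = pvHeading := by simpa using hhl
    have hsplit : PySem.Str.splitlines markdown = (pre ++ [hl]) ++ tl := by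
      rw [heq]; simp
    have hlen : (pre ++ [hl]).length = k + 1 := by simp [hk']
    -- A's index material
    have hcast1 : ((k : Int) + 1) = ((k + 1 : Nat) : Int) := by push_cast; ring
    have hdrop : PySem.List.slice (PySem.Str.splitlines markdown) (some ((k : Int) + 1)) none = tl := by
      rw [hcast1, PySem.List.slice_from _ (Int.natCast_nonneg _), Int.toNat_natCast, hsplit,
        List.drop_left' hlen]
    have hend : aFindEnd (PySem.List.slice (PySem.Str.splitlines markdown) (some ((k : Int) + 1)) none) (k + 1)
        = (k + 1) + pvSharp tl := by
      rw [hdrop, aFindEnd_eq]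
    have hcast2 : (((k + 1) + pvSharp tl : Nat) : Int) = (((k + 1 + pvSharp tl : Nat)) : Int) := by rfl
    have hsect : PySem.List.slice (PySem.Str.splitlines markdown) (some ((k : Int) + 1))
        (some (((k + 1) + pvSharp tl : Nat) : Int)) = tl.take (pvSharp tl) := by
      rw [hcast1, PySem.List.slice_natCast, hsplit, List.drop_left' hlen]
      congr 1
      omega
    have htake : PySem.List.slice (PySem.Str.splitlines markdown) none (some ((k : Int) + 1))
        = pre ++ [hl] := by
      rw [hcast1, PySem.List.slice_to _ (Int.natCast_nonneg _), Int.toNat_natCast, hsplit,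
        List.take_left' hlen]
    have hrest : PySem.List.slice (PySem.Str.splitlines markdown)
        (some (((k + 1) + pvSharp tl : Nat) : Int)) none = tl.drop (pvSharp tl) := by
      rw [PySem.List.slice_from _ (Int.natCast_nonneg _), Int.toNat_natCast, hsplit]
      rw [show (k + 1) + pvSharp tl = (pre ++ [hl]).length + pvSharp tl by omega]
      rw [List.drop_append]
      simp
    -- B's pass
    have hlb : pvLastBlank (pre ++ [hl]) = false := by
      simp only [pvLastBlank, List.getLast?_concat]
      rw [hstrip]
      decide
    have hbrun : bLoop (PySem.Str.splitlines markdown) [] 0 false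
        = ((pre ++ [hl]) ++ pvNorm false (pvFilt (tl.take (pvSharp tl))) ++ tl.drop (pvSharp tl),
            pvChg (tl.take (pvSharp tl))) := by
      rw [heq, bLoop_enter pre hl tl [] false hpre hhl, List.nil_append]
      rw [show tl = tl.take (pvSharp tl) ++ tl.drop (pvSharp tl) by simp]
      rw [bLoop_section _ _ _ _ (by
        intro l hm
        exact pvSharp_take tl l (by simpa using hm))]
      rw [hlb, Bool.false_or]
      rw [bLoop_tail _ _ _ (by
        have := pvSharp_drop tl
        simpa using this)]
      simp
    -- assemble
    simp only [hfs, hend, hsect, htake, hrest, hbrun]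
    rw [aFilterLoop_eq]
    simp only [List.nil_append, Bool.false_or]
    rw [aNormLoop_eq]
    simp only [List.nil_append]
    have hlbnil : pvLastBlank ([] : List String) = false := rfl
    simp only [hlbnil]
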